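-- pv_equiv track=rewrite | github.com/Quaesit0r/mechanism_search | dataset_creation/mechanism_generator.py | overlap_solver
-- ===== SOURCE A (Python) =====
-- def overlap_solver(list_of_tuples):
--     count_dict = {}  # create an empty dictionary to hold the count of each integer
--     for tuple1 in list_of_tuples:
--         for elem in tuple1:
--             for num in elem:
--                 if num in count_dict:
--                     count_dict[num] += 1
--                 else:
--                     count_dict[num] = 1
--     return [num for num in count_dict if count_dict[num] > 1]
-- ===== SOURCE B (Python) =====
-- def overlap_solver(list_of_tuples):
--     flat = [num for tuple1 in list_of_tuples for elem in tuple1 for num in elem]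
--     seen = set()
--     tagged = []
--     for num in reversed(flat):
--         if num in seen:
--             tagged.append(num)
--         else:
--             seen.add(num)
--     return list(dict.fromkeys(reversed(tagged)))
-- ===== Notes on version B (the rewrite author's own statement) =====
-- stated objective: alternative
-- what changed: Replaces A's forward counting pass (dict of occurrence counts, then a keys filter by count>1) with a backwards scan that tags every occurrence having a later duplicate using only a membership set, followed by an order-preserving dedup of the tagged occurrences; no counts are ever kept.
import Mathlib
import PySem

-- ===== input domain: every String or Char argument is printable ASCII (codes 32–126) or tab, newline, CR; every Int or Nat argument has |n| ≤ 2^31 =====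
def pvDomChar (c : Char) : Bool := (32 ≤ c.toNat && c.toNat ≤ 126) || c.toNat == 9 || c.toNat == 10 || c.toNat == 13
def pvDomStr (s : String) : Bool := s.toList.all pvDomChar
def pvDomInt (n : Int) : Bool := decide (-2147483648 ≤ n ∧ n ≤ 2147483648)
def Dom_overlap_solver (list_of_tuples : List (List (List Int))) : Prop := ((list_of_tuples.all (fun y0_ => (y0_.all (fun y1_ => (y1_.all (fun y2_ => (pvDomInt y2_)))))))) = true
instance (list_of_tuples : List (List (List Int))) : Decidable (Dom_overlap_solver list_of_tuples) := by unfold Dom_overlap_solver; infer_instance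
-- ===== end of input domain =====

-- B replaces A's forward counting pass (dict of counts + final keys filter) by a backwards
-- scan that tags every occurrence with a later duplicate, then an order-preserving dedup of
-- the tagged occurrences; no counts are kept (objective: alternative).

-- ===== PORT A =====
def overlap_solver (list_of_tuples : List (List (List Int))) : List Int :=
  let count_dict : PySem.Dict Int Int :=
    list_of_tuples.foldl (fun count_dict tuple1 =>
      tuple1.foldl (fun count_dict elem =>
        elem.foldl (fun count_dict num =>
          if count_dict.contains num then
            count_dict.insert num (count_dict.getD num 0 + 1)
          else
            count_dict.insert num 1) count_dict) count_dict) PySem.Dict.empty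
  count_dict.keys.filter (fun num => decide (count_dict.getD num 0 > 1))

-- ===== PORT B =====
-- loop body: 'if num in seen: tagged.append(num) else: seen.add(num)'
def overlap_solver_alt_step (st : PySem.Set Int × List Int) (num : Int) : PySem.Set Int × List Int :=
  if PySem.Set.contains st.1 num then
    (st.1, st.2 ++ [num])
  else
    (PySem.Set.add st.1 num, st.2)

def overlap_solver_alt (list_of_tuples : List (List (List Int))) : List Int :=
  let flat := list_of_tuples.flatMap (fun tuple1 => tuple1.flatMap (fun elem => elem))
  let st := flat.reverse.foldl overlap_solver_alt_step (PySem.Set.empty, [])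
  PySem.List.dedup st.2.reverse

-- ===== PRECONDITION & SPEC =====
def Spec_overlap_solver (list_of_tuples : List (List (List Int))) (out : List Int) : Prop := out = overlap_solver_alt list_of_tuples
instance (list_of_tuples : List (List (List Int))) (out : List Int) : Decidable (Spec_overlap_solver list_of_tuples out) := by unfold Spec_overlap_solver; infer_instance

-- ===== CLAIM (what is proved, stated in full; the proofs are below) =====
def Claim_equal_overlap_solver : Prop := ∀ (list_of_tuples : List (List (List Int))), Dom_overlap_solver list_of_tuples → Spec_overlap_solver list_of_tuples (overlap_solver list_of_tuples)

-- ===== LEMMAS AND PROOFS =====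

-- A's loop body equals the unconditional counter step.
theorem overlap_step_eq (d : PySem.Dict Int Int) (n : Int) :
    (if d.contains n then d.insert n (d.getD n 0 + 1) else d.insert n 1)
      = d.insert n (d.getD n 0 + 1) := by
  by_cases h : d.contains n = true
  · simp [h]
  · have h' : d.contains n = false := by simpa using h
    rw [PySem.Dict.getD_of_not_contains d (0 : Int) h']
    simp [h']

-- A's triple loop over the nested lists is the counter fold over the flattened list.
theorem overlap_dict_eq (list_of_tuples : List (List (List Int))) :
    list_of_tuples.foldl (fun count_dict tuple1 =>
      tuple1.foldl (fun count_dict elem =>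
        elem.foldl (fun count_dict num =>
          if count_dict.contains num then
            count_dict.insert num (count_dict.getD num 0 + 1)
          else
            count_dict.insert num 1) count_dict) count_dict)
      (PySem.Dict.empty : PySem.Dict Int Int)
      = PySem.Dict.counter (list_of_tuples.flatMap (fun tuple1 => tuple1.flatMap (fun elem => elem))) := by
  have hstep : (fun (d : PySem.Dict Int Int) (n : Int) =>
      if d.contains n then d.insert n (d.getD n 0 + 1) else d.insert n 1)
      = fun d n => d.insert n (d.getD n 0 + 1) := by
    funext d n; exact overlap_step_eq d n
  rw [hstep, ← PySem.Dict.foldl_insert_getD_add_one_eq_counter,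
      List.foldl_flatMap]
  simp only [List.foldl_flatten, List.flatMap_id']

-- A, characterised: first occurrences of the flat list, kept when the flat count exceeds 1.
theorem overlap_A_char (list_of_tuples : List (List (List Int))) :
    overlap_solver list_of_tuples
      = (PySem.Set.ofList (list_of_tuples.flatMap (fun tuple1 => tuple1.flatMap (fun elem => elem)))).filter
          (fun num => decide ((list_of_tuples.flatMap (fun tuple1 => tuple1.flatMap (fun elem => elem))).count num > 1)) := by
  simp only [overlap_solver]
  rw [overlap_dict_eq, PySem.Dict.keys_counter]
  exact List.filter_congr (fun x _ => by simp [PySem.Dict.getD_counter])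

-- accumulator form of Set.ofList's fold
theorem contains_iff (s : List Int) (a : Int) : s.contains a = true ↔ a ∈ s := by simp

theorem foldl_set_add_acc (t : List Int) (acc : PySem.Set Int) :
    t.foldl PySem.Set.add acc
      = acc ++ (t.foldl PySem.Set.add PySem.Set.empty).filter (fun y => !acc.contains y) := by
  induction t generalizing acc with
  | nil => simp [PySem.Set.empty]
  | cons y t ih =>
    rw [List.foldl_cons, ih (PySem.Set.add acc y), List.foldl_cons]
    rw [ih (PySem.Set.add PySem.Set.empty y)]
    have hadd0 : PySem.Set.add (PySem.Set.empty : PySem.Set Int) y = [y] := by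
      simp [PySem.Set.add, PySem.Set.contains, PySem.Set.empty]
    rw [hadd0]
    by_cases h : y ∈ acc
    · have hadd : PySem.Set.add acc y = acc := by
        simp [PySem.Set.add, PySem.Set.contains, h]
      rw [hadd]
      simp only [List.filter_append]
      congr 1
      have h1 : List.filter (fun x => !acc.contains x) [y] = [] := by
        simp [List.filter, h]
      rw [h1, List.nil_append, List.filter_filter]
      refine (List.filter_congr ?_).symm
      intro x _
      by_cases hxy : x = y
      · subst hxy; simp [h]
      · simp [hxy]
    · have hc : acc.contains y = false := by
        cases hcc : acc.contains y
        · rfl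
        · exact absurd ((contains_iff acc y).mp hcc) h
      have hadd : PySem.Set.add acc y = acc ++ [y] := by
        simp [PySem.Set.add, PySem.Set.contains]
        exact h
      rw [hadd]
      simp only [List.filter_append, List.append_assoc]
      congr 1
      have h2 : List.filter (fun x => !acc.contains x) [y] = [y] := by
        simp [List.filter, h]
      rw [h2]
      congr 1
      rw [List.filter_filter]
      refine List.filter_congr ?_
      intro x _
      by_cases hxy : x = y
      · subst hxy; simp
      · simp [hxy]

-- cons law for Set.ofList (first-occurrence dedup)
theorem ofList_cons (x : Int) (t : List Int) :
    PySem.Set.ofList (x :: t) = x :: (PySem.Set.ofList t).filter (fun y => decide (y ≠ x)) := by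
  rw [PySem.Set.ofList_eq_foldl, PySem.Set.ofList_eq_foldl, List.foldl_cons]
  have hadd0 : PySem.Set.add ([] : PySem.Set Int) x = [x] := by
    simp [PySem.Set.add, PySem.Set.contains]
  rw [hadd0, foldl_set_add_acc]
  simp only [PySem.Set.empty, List.singleton_append, List.cons.injEq, true_and]
  refine List.filter_congr ?_
  intro a _
  by_cases hax : a = x
  · subst hax; simp
  · simp [hax]

theorem mem_ofList_int (x : Int) (t : List Int) : x ∈ PySem.Set.ofList t ↔ x ∈ t := by
  rw [← PySem.List.dedup_eq_ofList]; exact PySem.List.mem_dedup (xs := t) (x := x)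

-- the occurrences of xs that are followed by a later equal element, in order
def dupOcc : List Int → List Int
  | [] => []
  | x :: t => if x ∈ t then x :: dupOcc t else dupOcc t

-- loop invariant for B's backwards tagging scan
theorem overlap_loop_spec (xs : List Int) :
    (∀ a, PySem.Set.contains (xs.reverse.foldl overlap_solver_alt_step (PySem.Set.empty, [])).1 a = true ↔ a ∈ xs)
    ∧ (xs.reverse.foldl overlap_solver_alt_step (PySem.Set.empty, [])).2 = (dupOcc xs).reverse := by
  induction xs with
  | nil =>
    refine ⟨fun a => ?_, ?_⟩
    · simp [PySem.Set.contains, PySem.Set.empty]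
    · simp [dupOcc]
  | cons x t ih =>
    obtain ⟨ihseen, ihres⟩ := ih
    have hrw : (x :: t).reverse.foldl overlap_solver_alt_step (PySem.Set.empty, [])
        = overlap_solver_alt_step (t.reverse.foldl overlap_solver_alt_step (PySem.Set.empty, [])) x := by
      rw [List.reverse_cons, List.foldl_append, List.foldl_cons, List.foldl_nil]
    set st := t.reverse.foldl overlap_solver_alt_step (PySem.Set.empty, []) with hst
    by_cases hmem : x ∈ t
    · have hin : x ∈ st.1 := (contains_iff st.1 x).mp ((ihseen x).mpr hmem)
      have hstep : (x :: t).reverse.foldl overlap_solver_alt_step (PySem.Set.empty, [])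
          = (st.1, st.2 ++ [x]) := by
        rw [hrw]; simp [overlap_solver_alt_step, PySem.Set.contains, hin]
      rw [hstep]
      refine ⟨fun a => ?_, ?_⟩
      · simp only
        rw [ihseen a]
        constructor
        · exact fun h => List.mem_cons_of_mem _ h
        · intro h
          rcases List.mem_cons.mp h with h | h
          · subst h; exact hmem
          · exact h
      · simp only
        rw [ihres, dupOcc, if_pos hmem, List.reverse_cons]
    · have hnin : x ∉ st.1 := fun hx =>
        hmem ((ihseen x).mp ((contains_iff st.1 x).mpr hx))
      have hstep : (x :: t).reverse.foldl overlap_solver_alt_step (PySem.Set.empty, [])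
          = (PySem.Set.add st.1 x, st.2) := by
        rw [hrw]; simp [overlap_solver_alt_step, PySem.Set.contains, hnin]
      have hadd : PySem.Set.add st.1 x = st.1 ++ [x] := by
        simp [PySem.Set.add, PySem.Set.contains]
        exact hnin
      rw [hstep]
      refine ⟨fun a => ?_, ?_⟩
      · simp only
        rw [hadd]
        constructor
        · intro hca
          rcases List.mem_append.mp ((contains_iff _ _).mp hca) with h1 | h1
          · exact List.mem_cons_of_mem _ ((ihseen a).mp ((contains_iff _ _).mpr h1))
          · simp at h1; subst h1; exact List.mem_cons_self
        · intro hmem2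
          apply (contains_iff _ _).mpr
          rcases List.mem_cons.mp hmem2 with h1 | h1
          · subst h1; exact List.mem_append.mpr (Or.inr (by simp))
          · exact List.mem_append.mpr (Or.inl ((contains_iff _ _).mp ((ihseen a).mpr h1)))
      · simp only
        rw [ihres, dupOcc, if_neg hmem]

-- the first occurrences of the tagged list are exactly the first occurrences with count > 1
theorem ofList_dupOcc (xs : List Int) :
    PySem.Set.ofList (dupOcc xs)
      = (PySem.Set.ofList xs).filter (fun v => decide (xs.count v > 1)) := by
  induction xs with
  | nil => simp [dupOcc, PySem.Set.ofList]
  | cons x t ih =>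
    by_cases hmem : x ∈ t
    · rw [dupOcc, if_pos hmem, ofList_cons, ih, ofList_cons]
      have hcx : (x :: t).count x > 1 := by
        have : t.count x ≥ 1 := List.count_pos_iff.mpr hmem
        simp [List.count_cons_self]; omega
      rw [List.filter_cons_of_pos (by simpa using hcx)]
      congr 1
      rw [List.filter_filter, List.filter_filter]
      refine List.filter_congr ?_
      intro a _
      by_cases hax : a = x
      · subst hax; simp
      · have : (x :: t).count a = t.count a := List.count_cons_of_ne (Ne.symm hax)
        simp [hax, this]
    · rw [dupOcc, if_neg hmem, ih, ofList_cons]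
      have hcx : ¬ ((x :: t).count x > 1) := by
        have : t.count x = 0 := List.count_eq_zero.mpr hmem
        simp [List.count_cons_self, this]
      rw [List.filter_cons_of_neg (by simpa using hcx)]
      rw [List.filter_filter]
      refine (List.filter_congr ?_).symm
      intro a ha
      have hat : a ∈ t := (mem_ofList_int a t).mp ha
      have hax : a ≠ x := fun h => hmem (h ▸ hat)
      have : (x :: t).count a = t.count a := List.count_cons_of_ne (Ne.symm hax)
      simp [hax, this]

theorem overlap_solver_eq (list_of_tuples : List (List (List Int))) :
    overlap_solver list_of_tuples = overlap_solver_alt list_of_tuples := by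
  rw [overlap_A_char]
  simp only [overlap_solver_alt]
  rw [(overlap_loop_spec _).2, List.reverse_reverse, PySem.List.dedup_eq_ofList,
      ofList_dupOcc]

-- ===== VERDICT (by name: the statement is the Claim_ definition above) =====
theorem overlap_solver_spec : Claim_equal_overlap_solver := by
  intro lot _
  unfold Spec_overlap_solver
  exact overlap_solver_eq lot
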